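-- pv_equiv track=rewrite | github.com/Isaam25/Ketchlist | Ketchlist/Ketchlist.py | active_assignment
-- ===== SOURCE A (Python) =====
-- def active_assignment(word, binary):
--     """Determine which characters should be replaced based on binary pattern."""
--     activ = []
--     activelet = []
--     for i in range(len(str(binary))):
--         if str(binary)[i] == '1':
--             activ.append(i)
--     for j in range(len(word)):
--         if j in activ:
--             activelet.append(word[j])
--     return [activelet, activ]
-- ===== SOURCE B (Python) =====
-- def active_assignment(word, binary):
--     """Determine which characters should be replaced based on binary pattern."""
--     activ = []
--     activelet = []
--     for i, ch in enumerate(str(binary)):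
--         if ch == '1':
--             activ.append(i)
--             if i < len(word):
--                 activelet.append(word[i])
--     return [activelet, activ]
-- ===== Notes on version B (the rewrite author's own statement) =====
-- stated objective: simpler
-- what changed: Single pass over enumerate(str(binary)) building both lists at once with an i < len(word) guard, instead of two separate index loops with an O(n) list-membership test inside the second.
import Mathlib
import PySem

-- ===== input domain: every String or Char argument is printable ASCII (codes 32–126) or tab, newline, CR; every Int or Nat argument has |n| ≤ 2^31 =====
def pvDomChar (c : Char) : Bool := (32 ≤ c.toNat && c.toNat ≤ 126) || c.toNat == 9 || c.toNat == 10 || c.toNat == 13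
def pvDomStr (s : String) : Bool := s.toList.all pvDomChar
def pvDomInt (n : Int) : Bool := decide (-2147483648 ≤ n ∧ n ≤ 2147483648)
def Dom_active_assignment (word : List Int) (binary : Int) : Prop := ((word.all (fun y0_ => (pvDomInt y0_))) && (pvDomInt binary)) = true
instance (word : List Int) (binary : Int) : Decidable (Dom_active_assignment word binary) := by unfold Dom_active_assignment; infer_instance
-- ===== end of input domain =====

-- B makes a single pass over enumerate(str(binary)) building both lists at once,
-- replacing A's two index loops and the O(n) membership test (objective: simpler).

-- ===== PORT A =====
def active_assignment (word : List Int) (binary : Int) : List (List Int) :=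
  let s := PySem.Int.toChars binary
  let activ := (PySem.List.pyRange 0 (s.length : Int) 1).foldl
    (fun acc i => if PySem.List.pyGetD s i ' ' = '1' then acc ++ [i] else acc) ([] : List Int)
  let activelet := (PySem.List.pyRange 0 (word.length : Int) 1).foldl
    (fun acc j => if j ∈ activ then acc ++ [PySem.List.pyGetD word j 0] else acc) ([] : List Int)
  [activelet, activ]

-- ===== PORT B =====
def active_assignment_alt (word : List Int) (binary : Int) : List (List Int) :=
  let st := (PySem.List.enumerate (PySem.Int.toChars binary) 0).foldl
    (fun (st : List Int × List Int) ic =>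
      if ic.2 = '1' then
        (st.1 ++ [ic.1],
         if ic.1 < (word.length : Int) then st.2 ++ [PySem.List.pyGetD word ic.1 0] else st.2)
      else st)
    (([] : List Int), ([] : List Int))
  [st.2, st.1]

-- ===== PRECONDITION & SPEC =====
def Spec_active_assignment (word : List Int) (binary : Int) (out : List (List Int)) : Prop := out = active_assignment_alt word binary
instance (word : List Int) (binary : Int) (out : List (List Int)) : Decidable (Spec_active_assignment word binary out) := by unfold Spec_active_assignment; infer_instance

-- ===== CLAIM (what is proved, stated in full; the proofs are below) =====
def Claim_equal_active_assignment : Prop := ∀ (word : List Int) (binary : Int), Dom_active_assignment word binary → Spec_active_assignment word binary (active_assignment word binary)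

-- ===== LEMMAS AND PROOFS =====

-- a paired loop with independent accumulators, guarded by one test, is two guarded loops
theorem foldl_pair_ite_split {γ : Type} (l : List γ) (P : γ → Prop) [DecidablePred P]
    (f g : List Int → γ → List Int) (a b : List Int) :
    l.foldl (fun st e => if P e then (f st.1 e, g st.2 e) else st) (a, b)
      = (l.foldl (fun s e => if P e then f s e else s) a,
         l.foldl (fun s e => if P e then g s e else s) b) := by
  have h : (fun (st : List Int × List Int) e => if P e then (f st.1 e, g st.2 e) else st)
      = (fun st e => (if P e then f st.1 e else st.1, if P e then g st.2 e else st.2)) := by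
    funext st e; split <;> rfl
  rw [h, PySem.List.foldl_prod_mk (f := fun s e => if P e then f s e else s)
        (g := fun s e => if P e then g s e else s)]

-- filtering a range from 0 by an upper bound truncates the range
theorem range_filter_lt (a b : Int) :
    (PySem.List.pyRange 0 a 1).filter (fun j => decide (j < b)) = PySem.List.pyRange 0 (min a b) 1 := by
  rcases le_or_gt a b with h | h
  · rw [min_eq_left h]
    apply List.filter_eq_self.mpr
    intro x hx
    have := (PySem.List.mem_pyRange_one).mp hx
    simp; omega
  · rw [min_eq_right h.le]
    rcases le_or_gt b 0 with hb | hb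
    · rw [PySem.List.pyRange_one_eq_nil hb]
      apply List.filter_eq_nil_iff.mpr
      intro x hx
      have := (PySem.List.mem_pyRange_one).mp hx
      simp; omega
    · rw [PySem.List.pyRange_one_append 0 b a hb.le h.le, List.filter_append]
      have h1 : (PySem.List.pyRange 0 b 1).filter (fun j => decide (j < b)) = PySem.List.pyRange 0 b 1 := by
        apply List.filter_eq_self.mpr
        intro x hx
        have := (PySem.List.mem_pyRange_one).mp hx
        simp; omega
      have h2 : (PySem.List.pyRange b a 1).filter (fun j => decide (j < b)) = [] := by
        apply List.filter_eq_nil_iff.mpr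
        intro x hx
        have := (PySem.List.mem_pyRange_one).mp hx
        simp; omega
      rw [h1, h2, List.append_nil]

theorem pyRange_filter_mem_filter (n m : Int) (p : Int → Prop) [DecidablePred p] :
    (PySem.List.pyRange 0 m 1).filter
        (fun j => decide (j ∈ (PySem.List.pyRange 0 n 1).filter (fun i => decide (p i))))
      = ((PySem.List.pyRange 0 n 1).filter (fun i => decide (p i))).filter
          (fun i => decide (i < m)) := by
  have hmem : ∀ j : Int, (j ∈ (PySem.List.pyRange 0 n 1).filter (fun i => decide (p i)))
      ↔ ((0 ≤ j ∧ j < n) ∧ p j) := by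
    intro j; simp [List.mem_filter, PySem.List.mem_pyRange_one]
  have lhs : (PySem.List.pyRange 0 m 1).filter
      (fun j => decide (j ∈ (PySem.List.pyRange 0 n 1).filter (fun i => decide (p i))))
      = ((PySem.List.pyRange 0 m 1).filter (fun j => decide (j < n))).filter
          (fun j => decide (p j)) := by
    rw [List.filter_filter]
    apply List.filter_congr
    intro x hx
    have hx' := (PySem.List.mem_pyRange_one).mp hx
    simp [hmem x, hx'.1]
    exact Bool.and_comm _ _
  have rhs : ((PySem.List.pyRange 0 n 1).filter (fun i => decide (p i))).filter
      (fun i => decide (i < m))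
      = ((PySem.List.pyRange 0 n 1).filter (fun j => decide (j < m))).filter
          (fun j => decide (p j)) := by
    rw [List.filter_filter, List.filter_filter]
    apply List.filter_congr
    intro x _
    exact Bool.and_comm _ _
  rw [lhs, rhs, range_filter_lt, range_filter_lt, min_comm]

theorem active_assignment_eq (word : List Int) (binary : Int) :
    active_assignment word binary = active_assignment_alt word binary := by
  unfold active_assignment active_assignment_alt
  set s := PySem.Int.toChars binary with hs
  set p : Int → Prop := fun i => PySem.List.pyGetD s i ' ' = '1' with hp
  set m : Int := (word.length : Int) with hm
  set w : Int → Int := fun i => PySem.List.pyGetD word i 0 with hw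
  set F := (PySem.List.pyRange 0 (s.length : Int) 1).filter (fun i => decide (p i)) with hF
  -- A's first loop is a filter of the index range
  have hA1 : (PySem.List.pyRange 0 (s.length : Int) 1).foldl
      (fun acc i => if p i then acc ++ [i] else acc) ([] : List Int) = F := by
    rw [PySem.List.foldl_append_ite_eq_filter, List.nil_append]
  -- A's second loop is a filter-then-map over the word index range
  have hA2 : (PySem.List.pyRange 0 m 1).foldl
      (fun acc j => if j ∈ F then acc ++ [w j] else acc) ([] : List Int)
      = (F.filter (fun i => decide (i < m))).map w := by
    rw [PySem.List.foldl_append_ite (p := fun j => j ∈ F) (f := w), List.nil_append, hF,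
        pyRange_filter_mem_filter]
  -- B's single loop computes the pair (F, same filter-then-map)
  have hB : (PySem.List.enumerate s 0).foldl
      (fun (st : List Int × List Int) ic =>
        if ic.2 = '1' then
          (st.1 ++ [ic.1], if ic.1 < m then st.2 ++ [w ic.1] else st.2)
        else st) (([] : List Int), ([] : List Int))
      = (F, (F.filter (fun i => decide (i < m))).map w) := by
    rw [PySem.List.enumerate_eq_map_pyRange (d := ' '), List.foldl_map]
    show List.foldl (fun (st : List Int × List Int) (e : Int) =>
        if p e then (st.1 ++ [e], if e < m then st.2 ++ [w e] else st.2) else st)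
      ([], []) (PySem.List.pyRange 0 (PySem.List.len s) 1) = _
    rw [foldl_pair_ite_split (PySem.List.pyRange 0 (PySem.List.len s) 1) p
        (fun st e => st ++ [e])
        (fun st e => if e < m then st ++ [w e] else st) [] []]
    refine Prod.ext ?_ ?_
    · simpa using hA1
    · show (PySem.List.pyRange 0 (s.length : Int) 1).foldl
        (fun st e => if p e then (if e < m then st ++ [w e] else st) else st) []
        = (F.filter (fun i => decide (i < m))).map w
      rw [PySem.List.foldl_ite_eq_foldl_filter (p := p)
          (f := fun st e => if e < m then st ++ [w e] else st), ← hF,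
          PySem.List.foldl_append_ite (p := fun e => e < m) (f := w), List.nil_append]
  show [List.foldl (fun acc j => if j ∈ (List.foldl
            (fun acc i => if p i then acc ++ [i] else acc) ([] : List Int)
            (PySem.List.pyRange 0 (s.length : Int) 1)) then acc ++ [w j] else acc)
          ([] : List Int) (PySem.List.pyRange 0 m 1),
        List.foldl (fun acc i => if p i then acc ++ [i] else acc) ([] : List Int)
          (PySem.List.pyRange 0 (s.length : Int) 1)]
      = [(List.foldl (fun (st : List Int × List Int) ic =>
            if ic.2 = '1' then
              (st.1 ++ [ic.1], if ic.1 < m then st.2 ++ [w ic.1] else st.2)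
            else st) (([] : List Int), ([] : List Int)) (PySem.List.enumerate s 0)).2,
         (List.foldl (fun (st : List Int × List Int) ic =>
            if ic.2 = '1' then
              (st.1 ++ [ic.1], if ic.1 < m then st.2 ++ [w ic.1] else st.2)
            else st) (([] : List Int), ([] : List Int)) (PySem.List.enumerate s 0)).1]
  rw [hA1, hB, hA2]

-- ===== VERDICT (by name: the statement is the Claim_ definition above) =====
theorem active_assignment_spec : Claim_equal_active_assignment := by
  intro word binary _
  unfold Spec_active_assignment
  exact active_assignment_eq word binary
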